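-- pv_equiv track=rewrite | github.com/juanestebancg2806/codeforces | 1296A/1296A.py | solve
-- ===== SOURCE A (Python) =====
-- def solve(a: list) -> bool:
--     ans,_sum,odd,even = True,sum(a),0,0
--     if _sum%2 == 0:
--         for i in range(len(a)):
--             odd = odd+1 if a[i]%2 != 0 else odd
--             even = even+1 if a[i]%2 == 0 else even
--         if odd == 0 or (odd%2 == 0 and even == 0): ans = False
--
--     return ans
-- ===== SOURCE B (Python) =====
-- def solve(a: list) -> bool:
--     # Classify by the set of residues mod 2: mixed parities always allow an odd sum;
--     # all-even can never; all-odd gives odd sum exactly when the length is odd.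
--     parities = {x % 2 for x in a}
--     if len(parities) == 2:
--         return True
--     return parities == {1} and len(a) % 2 == 1
-- ===== Notes on version B (the rewrite author's own statement) =====
-- stated objective: simpler
-- what changed: Drops the sum and both running counters entirely: B builds the set of residues mod 2 and classifies it (mixed parities => True; all-odd => length parity decides; all-even or empty => False), replacing A's sum-parity test plus counting loop with a set-cardinality case analysis.
import Mathlib
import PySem

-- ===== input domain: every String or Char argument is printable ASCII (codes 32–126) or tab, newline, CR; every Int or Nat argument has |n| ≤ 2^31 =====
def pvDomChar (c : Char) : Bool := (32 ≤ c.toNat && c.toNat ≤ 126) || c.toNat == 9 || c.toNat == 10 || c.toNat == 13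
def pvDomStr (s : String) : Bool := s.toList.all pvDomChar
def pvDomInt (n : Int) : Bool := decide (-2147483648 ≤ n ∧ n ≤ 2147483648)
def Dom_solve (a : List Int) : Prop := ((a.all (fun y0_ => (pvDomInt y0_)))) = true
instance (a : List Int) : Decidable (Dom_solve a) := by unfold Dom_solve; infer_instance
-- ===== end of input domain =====

-- B drops A's sum and counting loop entirely: it builds the set of residues mod 2 and
-- classifies it (mixed ⇒ True; all-odd ⇒ length parity decides; all-even/empty ⇒ False). Simpler, same cost.

-- ===== PORT A =====
-- a[i] with i drawn from range(len(a)) is always in range, so pyGetD with default 0 is exact here.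
def solve (a : List Int) : Bool :=
  let s : Int := a.foldl (· + ·) 0
  if PySem.Int.mod s 2 == 0 then
    let oe : Int × Int :=
      (PySem.List.pyRange 0 (a.length : Int) 1).foldl
        (fun (oe : Int × Int) i =>
          ((if PySem.Int.mod (PySem.List.pyGetD a i 0) 2 != 0 then oe.1 + 1 else oe.1),
           (if PySem.Int.mod (PySem.List.pyGetD a i 0) 2 == 0 then oe.2 + 1 else oe.2)))
        (0, 0)
    if oe.1 == 0 || (PySem.Int.mod oe.1 2 == 0 && oe.2 == 0) then false else true
  else true

-- ===== PORT B =====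
def solve_alt (a : List Int) : Bool :=
  let parities : PySem.Set Int := PySem.Set.ofList (a.map (fun x => PySem.Int.mod x 2))
  if PySem.Set.len parities == 2 then true
  else PySem.Set.equal parities (PySem.Set.ofList [1]) && (PySem.Int.mod (PySem.List.len a) 2 == 1)

-- ===== PRECONDITION & SPEC =====
def Spec_solve (a : List Int) (out : Bool) : Prop := out = solve_alt a
instance (a : List Int) (out : Bool) : Decidable (Spec_solve a out) := by unfold Spec_solve; infer_instance

-- ===== CLAIM (what is proved, stated in full; the proofs are below) =====
def Claim_equal_solve : Prop := ∀ (a : List Int), Dom_solve a → Spec_solve a (solve a)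

-- ===== LEMMAS AND PROOFS =====

theorem pv_mod_two (x : Int) : PySem.Int.mod x 2 = x % 2 :=
  PySem.Int.mod_eq_emod_of_pos (by norm_num)

-- A's counter loop computes the two parity counts.
theorem pv_count_loop (a : List Int) (o e : Int) :
    a.foldl
      (fun (oe : Int × Int) x =>
        ((if x % 2 != 0 then oe.1 + 1 else oe.1),
         (if x % 2 == 0 then oe.2 + 1 else oe.2))) (o, e)
    = (o + (a.countP (fun x => x % 2 != 0) : Int),
       e + (a.countP (fun x => x % 2 == 0) : Int)) := by
  induction a generalizing o e with
  | nil => simp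
  | cons x l ih =>
    simp only [List.foldl_cons, ih, List.countP_cons]
    simp only [Prod.mk.injEq]
    constructor <;> split_ifs <;> push_cast <;> ring

-- the sum's parity is the parity of the odd count
theorem pv_sum_parity (a : List Int) (s : Int) :
    (a.foldl (· + ·) s) % 2 = (s + (a.countP (fun x => x % 2 != 0) : Int)) % 2 := by
  induction a generalizing s with
  | nil => simp
  | cons x l ih =>
    simp only [List.foldl_cons, ih, List.countP_cons, bne_iff_ne, ne_eq]
    split_ifs with h <;> push_cast <;> omega

-- A, characterised by the two parity counts
theorem pv_A_char (a : List Int) :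
    solve a
      = ((a.countP (fun x => x % 2 != 0) % 2 == 1)
          || ((a.countP (fun x => x % 2 != 0) != 0)
              && (a.countP (fun x => x % 2 == 0) != 0))) := by
  unfold solve
  rw [show ((a.length : Int)) = PySem.List.len a from rfl]
  rw [PySem.List.foldl_pyRange_pyGetD (xs := a) (d := (0 : Int))
      (init := ((0 : Int), (0 : Int)))
      (f := fun (oe : Int × Int) x =>
        ((if PySem.Int.mod x 2 != 0 then oe.1 + 1 else oe.1),
         (if PySem.Int.mod x 2 == 0 then oe.2 + 1 else oe.2)))
      (by norm_num)]
  simp only [pv_mod_two, Int.toNat_zero, List.drop_zero]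
  rw [pv_count_loop, pv_sum_parity a 0]
  rw [Bool.eq_iff_iff]
  split_ifs with hs hc
  · simp only [beq_iff_eq, bne_iff_ne, ne_eq, Bool.or_eq_true, Bool.and_eq_true, zero_add,
      false_iff, not_or, not_and] at hs hc ⊢
    omega
  · simp only [beq_iff_eq, bne_iff_ne, ne_eq, Bool.or_eq_true, Bool.and_eq_true, zero_add,
      true_iff, not_or] at hs hc ⊢
    omega
  · simp only [beq_iff_eq, bne_iff_ne, ne_eq, Bool.or_eq_true, Bool.and_eq_true, zero_add,
      true_iff] at hs ⊢
    omega

-- a nodup list of values in {0, 1} is one of five lists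
theorem pv_set01 (s : List Int) (hn : s.Nodup) (hsub : ∀ y ∈ s, y = 0 ∨ y = 1) :
    s = [] ∨ s = [0] ∨ s = [1] ∨ s = [0, 1] ∨ s = [1, 0] := by
  match s, hn, hsub with
  | [], _, _ => exact Or.inl rfl
  | [x], _, hsub =>
    rcases hsub x (by simp) with h | h <;> subst h <;> simp
  | [x, y], hn, hsub =>
    have hx := hsub x (by simp)
    have hy := hsub y (by simp)
    have hxy : x ≠ y := by simp at hn; exact hn
    rcases hx with h | h <;> rcases hy with h' | h' <;> subst h <;> subst h' <;> simp_all
  | x :: y :: z :: t, hn, hsub =>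
    have hx := hsub x (by simp)
    have hy := hsub y (by simp)
    have hz := hsub z (by simp)
    simp only [List.nodup_cons, List.mem_cons, not_or] at hn
    exfalso
    rcases hx with h|h <;> rcases hy with h'|h' <;> rcases hz with h''|h'' <;> simp_all

theorem pv_main (a : List Int) : solve a = solve_alt a := by
  rw [pv_A_char]
  unfold solve_alt
  simp only [pv_mod_two]
  set s : PySem.Set Int := PySem.Set.ofList (a.map (fun x => x % 2)) with hsdef
  have hn : s.Nodup := by rw [hsdef]; exact PySem.Set.nodup_ofList _
  have hsub : ∀ y ∈ s, y = 0 ∨ y = 1 := by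
    intro y hy
    rw [hsdef, PySem.Set.mem_ofList] at hy
    rcases List.mem_map.mp hy with ⟨x, _, rfl⟩
    omega
  have h0 : ((0 : Int) ∈ s) ↔ a.countP (fun x => x % 2 == 0) ≠ 0 := by
    rw [hsdef, PySem.Set.mem_ofList]
    simp only [List.mem_map, ne_eq, List.countP_eq_zero, beq_iff_eq, not_forall, not_not,
      exists_prop]
  have h1 : ((1 : Int) ∈ s) ↔ a.countP (fun x => x % 2 != 0) ≠ 0 := by
    rw [hsdef, PySem.Set.mem_ofList]
    simp only [List.mem_map, ne_eq, List.countP_eq_zero, bne_iff_ne, not_forall, not_not,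
      exists_prop]
    constructor
    · rintro ⟨x, hx, he⟩; exact ⟨x, hx, by omega⟩
    · rintro ⟨x, hx, he⟩; exact ⟨x, hx, by omega⟩
  have hlen : a.length = a.countP (fun x => x % 2 != 0) + a.countP (fun x => x % 2 == 0) := by
    rw [List.length_eq_countP_add_countP (p := fun x => x % 2 != 0)]
    congr 1
    exact List.countP_congr (by intro x _; simp [bne])
  rcases pv_set01 s hn hsub with hc | hc | hc | hc | hc <;> rw [hc] <;> rw [hc] at h0 h1
  · -- s = []: a has neither parity, so both sides are false
    have hcO : a.countP (fun x => x % 2 != 0) = 0 := by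
      by_contra h; exact absurd (h1.mpr h) (by simp)
    have hcE : a.countP (fun x => x % 2 == 0) = 0 := by
      by_contra h; exact absurd (h0.mpr h) (by simp)
    simp [hcO, hcE]
  · -- s = [0]: no odd elements
    have hcO : a.countP (fun x => x % 2 != 0) = 0 := by
      by_contra h; exact absurd (h1.mpr h) (by norm_num)
    rw [if_neg (by decide), show PySem.Set.equal ([0] : PySem.Set Int) (PySem.Set.ofList [1]) = false from rfl]
    simp [hcO]
  · -- s = [1]: no even elements, so the length is the odd count
    have hcE : a.countP (fun x => x % 2 == 0) = 0 := by
      by_contra h; exact absurd (h0.mpr h) (by norm_num)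
    rw [if_neg (by decide), show PySem.Set.equal ([1] : PySem.Set Int) (PySem.Set.ofList [1]) = true from rfl,
      Bool.true_and, show PySem.List.len a = (a.length : Int) from rfl]
    rw [Bool.eq_iff_iff]
    simp only [beq_iff_eq, bne_iff_ne, ne_eq, Bool.or_eq_true, Bool.and_eq_true]
    omega
  · -- s = [0, 1]: both parities present
    have hcO : a.countP (fun x => x % 2 != 0) ≠ 0 := h1.mp (by norm_num)
    have hcE : a.countP (fun x => x % 2 == 0) ≠ 0 := h0.mp (by norm_num)
    rw [if_pos (by decide)]
    simp [hcO, hcE]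
  · -- s = [1, 0]: both parities present
    have hcO : a.countP (fun x => x % 2 != 0) ≠ 0 := h1.mp (by norm_num)
    have hcE : a.countP (fun x => x % 2 == 0) ≠ 0 := h0.mp (by norm_num)
    rw [if_pos (by decide)]
    simp [hcO, hcE]

-- ===== VERDICT (by name: the statement is the Claim_ definition above) =====
theorem solve_spec : Claim_equal_solve := by
  intro a _
  exact pv_main a
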